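-- pv_equiv track=rewrite | github.com/bokyung08/programmers | Python3/프로그래머스/0/181864. 문자열 바꿔서 찾기/문자열 바꿔서 찾기.py | solution
-- ===== SOURCE A (Python) =====
-- def solution(myString, pat):
--     myString=list(myString)
--     str=""
--     for i in range(0,len(myString),1):
--         if myString[i]=="A":
--             myString[i]="B"
--         elif myString[i]=="B":
--             myString[i]="A"
--         else:
--             continue
--     for i in range(0,len(myString),1):
--         str+=myString[i]
--     if pat in str:
--         return 1
--     else:
--         return 0
-- ===== SOURCE B (Python) =====
-- def _match_at(myString, pat, i):
--     # pat matches the text at offset i under the A<->B swap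
--     for j in range(len(pat)):
--         t = myString[i + j]
--         swapped = "B" if t == "A" else "A" if t == "B" else t
--         if pat[j] != swapped:
--             return False
--     return True
--
--
-- def solution(myString, pat):
--     # naive sliding-window matcher: compare characters through the swap,
--     # never building a swapped string and never calling `in`
--     for i in range(len(myString) - len(pat) + 1):
--         if _match_at(myString, pat, i):
--             return 1
--     return 0
-- ===== Notes on version B (the rewrite author's own statement) =====
-- stated objective: alternative
-- what changed: Instead of rebuilding the whole text with A/B swapped (list mutation plus character-by-character string concatenation) and delegating to the built-in substring test ('pat in str'), B is an explicit naive sliding-window matcher: for each alignment i it compares pat character by character against the original text through the A/B swap, returning at the first full match; no swapped string is ever built and no substring primitive is used.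
import Mathlib
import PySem

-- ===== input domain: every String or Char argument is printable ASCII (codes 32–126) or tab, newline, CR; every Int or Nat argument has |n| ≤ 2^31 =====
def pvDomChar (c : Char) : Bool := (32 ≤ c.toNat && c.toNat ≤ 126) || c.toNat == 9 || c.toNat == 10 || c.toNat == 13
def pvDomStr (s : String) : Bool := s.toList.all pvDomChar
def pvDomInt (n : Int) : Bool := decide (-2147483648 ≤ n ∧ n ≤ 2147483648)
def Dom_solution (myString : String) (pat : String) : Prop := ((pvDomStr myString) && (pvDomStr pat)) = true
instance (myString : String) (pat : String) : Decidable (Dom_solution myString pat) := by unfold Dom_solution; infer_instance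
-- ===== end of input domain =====

-- B replaces A's rebuild-the-swapped-text + built-in substring test by an explicit naive sliding-window matcher comparing pat against the original text through the A/B swap.


-- ===== PORT A =====
-- A: copy the text into a list, mutate it in place (A↔B), rebuild a string char by char, then test 'pat in str'.
def solution (myString : String) (pat : String) : Int :=
  let ms0 : List Char := myString.toList
  let ms : List Char :=
    (PySem.List.pyRange 0 ms0.length 1).foldl
      (fun l i =>
        if PySem.List.pyGetD l i ' ' = 'A' then PySem.List.pySetD l i 'B'
        else if PySem.List.pyGetD l i ' ' = 'B' then PySem.List.pySetD l i 'A'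
        else l)
      ms0
  let s : List Char :=
    (PySem.List.pyRange 0 ms.length 1).foldl
      (fun acc i => acc ++ [PySem.List.pyGetD ms i ' ']) []
  if PySem.Chars.isIn pat.toList s then 1 else 0

-- ===== PORT B =====
-- B helper: the inner loop of _match_at, an 'all' over j in range(len(pat)) (early return False = all).
def matchAt (t p : List Char) (i : Int) : Bool :=
  (PySem.List.pyRange 0 (p.length : Int) 1).all (fun j =>
    let tc := PySem.List.pyGetD t (i + j) ' '
    let sw := if tc = 'A' then 'B' else if tc = 'B' then 'A' else tc
    PySem.List.pyGetD p j ' ' == sw)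

-- B: for i in range(n-m+1): if _match_at(...): return 1; return 0  (early return = find?)
def solution_alt (myString : String) (pat : String) : Int :=
  let t : List Char := myString.toList
  let p : List Char := pat.toList
  match (PySem.List.pyRange 0 ((t.length : Int) - (p.length : Int) + 1) 1).find?
      (fun i => matchAt t p i) with
  | some _ => 1
  | none => 0

-- ===== PRECONDITION & SPEC =====
def Spec_solution (myString : String) (pat : String) (out : Int) : Prop := out = solution_alt myString pat
instance (myString : String) (pat : String) (out : Int) : Decidable (Spec_solution myString pat out) := by unfold Spec_solution; infer_instance

-- ===== CLAIM =====
def Claim_equal_solution : Prop := ∀ (myString : String) (pat : String), Dom_solution myString pat → Spec_solution myString pat (solution myString pat)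

-- ===== LEMMAS AND PROOFS =====

def swapAB (c : Char) : Char := if c = 'A' then 'B' else if c = 'B' then 'A' else c

-- The first loop of A turns xs into xs.map swapAB (invariant over the prefix processed so far).
theorem loop1_eq_map (xs : List Char) (k : Nat) (hk : k ≤ xs.length) :
    (PySem.List.pyRange 0 k 1).foldl
      (fun l i =>
        if PySem.List.pyGetD l i ' ' = 'A' then PySem.List.pySetD l i 'B'
        else if PySem.List.pyGetD l i ' ' = 'B' then PySem.List.pySetD l i 'A'
        else l)
      xs
    = (xs.take k).map swapAB ++ xs.drop k := by
  induction k with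
  | zero => simp [PySem.List.pyRange_one_eq_nil]
  | succ n ih =>
    have hn : n ≤ xs.length := Nat.le_of_succ_le hk
    have hsplit : PySem.List.pyRange 0 ((n : Int) + 1) 1
        = PySem.List.pyRange 0 (n : Int) 1 ++ [(n : Int)] := by
      exact PySem.List.pyRange_one_succ_right (by omega)
    have hcast : ((n + 1 : Nat) : Int) = (n : Int) + 1 := by push_cast; ring
    rw [hcast, hsplit, List.foldl_append, ih hn]
    simp only [List.foldl]
    have hlen : ((xs.take n).map swapAB).length = n := by
      simp [List.length_take, Nat.min_eq_left hn]
    have hget : PySem.List.pyGetD ((xs.take n).map swapAB ++ xs.drop n) (n : Int) ' '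
        = xs[n]'(by omega) := by
      rw [PySem.List.pyGetD_natCast]
      rw [List.getD_eq_getElem _ _ (by simp [List.length_take]; omega)]
      rw [List.getElem_append_right (by omega)]
      simp only [List.getElem_drop]
      congr 1
      omega
    have hdrop : xs.drop n = xs[n]'(by omega) :: xs.drop (n + 1) := List.drop_eq_getElem_cons (by omega)
    have htake : xs.take (n + 1) = xs.take n ++ [xs[n]'(by omega)] := List.take_succ_eq_append_getElem (by omega)
    have hset : ∀ v : Char,
        PySem.List.pySetD ((xs.take n).map swapAB ++ xs.drop n) (n : Int) v
        = (xs.take n).map swapAB ++ v :: xs.drop (n + 1) := by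
      intro v
      rw [PySem.List.pySetD_natCast, List.set_append_right _ _ (by rw [hlen]), hlen,
        Nat.sub_self, hdrop, List.set_cons_zero]
    rw [hget]
    split_ifs with hA hB
    · rw [hset, htake]; simp [swapAB, hA]
    · rw [hset, htake]; simp [swapAB, hB]
    · have hsw : swapAB (xs[n]'(by omega)) = xs[n]'(by omega) := by simp [swapAB, hA, hB]
      rw [htake, List.map_append]
      conv_lhs => rw [hdrop]
      simp [hsw]

-- matchAt succeeds at a legal offset i  ↔  pat is a prefix of (map swapAB t).drop i
theorem matchAt_iff_prefix (t p : List Char) (i : Nat) (hi : i + p.length ≤ t.length) :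
    matchAt t p (i : Int) = true ↔ p <+: (t.map swapAB).drop i := by
  unfold matchAt
  rw [List.all_eq_true]
  have hlen : ((t.map swapAB).drop i).length = t.length - i := by simp
  constructor
  · intro h
    rw [List.prefix_iff_eq_take]
    apply List.ext_getElem (by simp [List.length_take]; omega)
    intro j hj hj'
    have hjp : j < p.length := hj
    have hmem : ((j : Nat) : Int) ∈ PySem.List.pyRange 0 (p.length : Int) 1 := by
      rw [PySem.List.mem_pyRange_one]; constructor <;> [omega; exact_mod_cast hjp]
    have := h _ hmem
    simp only [beq_iff_eq] at this
    have hij : i + j < t.length := by omega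
    have hgt : PySem.List.pyGetD t ((i : Int) + (j : Int)) ' ' = t[i + j]'hij := by
      have : ((i : Int) + (j : Int)) = ((i + j : Nat) : Int) := by push_cast; ring
      rw [this, PySem.List.pyGetD_natCast, List.getD_eq_getElem _ _ hij]
    have hgp : PySem.List.pyGetD p ((j : Nat) : Int) ' ' = p[j]'hjp := by
      rw [PySem.List.pyGetD_natCast, List.getD_eq_getElem _ _ hjp]
    rw [hgt, hgp] at this
    rw [List.getElem_take, List.getElem_drop, List.getElem_map]
    rw [this]; rfl
  · intro h j hj
    rw [PySem.List.mem_pyRange_one] at hj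
    obtain ⟨hj0, hjm⟩ := hj
    -- j is a nonneg Int < p.length
    obtain ⟨k, rfl⟩ := Int.eq_ofNat_of_zero_le hj0
    have hkp : k < p.length := by exact_mod_cast hjm
    have hij : i + k < t.length := by omega
    have hpre := List.prefix_iff_eq_take.mp h
    have hpk : p[k]'hkp = swapAB (t[i + k]'hij) := by
      have := List.IsPrefix.getElem h (i := k) (by omega)
      rw [List.getElem_drop, List.getElem_map] at this
      exact this.symm ▸ rfl
    simp only [beq_iff_eq]
    have hgt : PySem.List.pyGetD t ((i : Int) + (k : Int)) ' ' = t[i + k]'hij := by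
      have : ((i : Int) + (k : Int)) = ((i + k : Nat) : Int) := by push_cast; ring
      rw [this, PySem.List.pyGetD_natCast, List.getD_eq_getElem _ _ hij]
    have hgp : PySem.List.pyGetD p ((k : Nat) : Int) ' ' = p[k]'hkp := by
      rw [PySem.List.pyGetD_natCast, List.getD_eq_getElem _ _ hkp]
    rw [hgt, hgp, hpk]; rfl

-- B's outer search succeeds  ↔  pat is an infix of the swapped text.
theorem find_iff_isIn (t p : List Char) :
    (∃ i ∈ PySem.List.pyRange 0 ((t.length : Int) - (p.length : Int) + 1) 1,
        matchAt t p i = true)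
    ↔ PySem.Chars.isIn p (t.map swapAB) = true := by
  rw [← PySem.Chars.exists_prefix_drop_iff_isIn]
  constructor
  · rintro ⟨i, hi, hm⟩
    rw [PySem.List.mem_pyRange_one] at hi
    obtain ⟨hi0, hiu⟩ := hi
    obtain ⟨k, rfl⟩ := Int.eq_ofNat_of_zero_le hi0
    have hk : k + p.length ≤ t.length := by omega
    exact ⟨k, (matchAt_iff_prefix t p k hk).mp hm⟩
  · rintro ⟨j, hpre⟩
    have hlen := hpre.length_le
    simp only [List.length_drop, List.length_map] at hlen
    by_cases hj : j ≤ t.length - p.length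
    · have hk2 : j + p.length ≤ t.length := by omega
      exact ⟨(j : Int), by rw [PySem.List.mem_pyRange_one]; omega,
        (matchAt_iff_prefix t p j hk2).mpr hpre⟩
    · -- j too large: then p = [] (prefix of a too-short drop), use offset 0
      have hp0 : p.length = 0 := by omega
      have hk2 : 0 + p.length ≤ t.length := by omega
      refine ⟨0, by rw [PySem.List.mem_pyRange_one]; omega, ?_⟩
      have : p = [] := List.length_eq_zero_iff.mp hp0
      exact (matchAt_iff_prefix t p 0 hk2).mpr (by simp [this])

-- ===== VERDICT =====
theorem solution_spec : Claim_equal_solution := by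
  intro myString pat _
  show solution myString pat = solution_alt myString pat
  simp only [solution, solution_alt]
  rw [loop1_eq_map myString.toList myString.toList.length (le_refl _)]
  simp only [List.take_length, List.drop_length, List.append_nil]
  rw [PySem.List.foldl_pyRange_zero_pyGetD' (myString.toList.map swapAB) ' '
    (fun acc c => acc ++ [c]) []]
  rw [PySem.List.foldl_append_singleton_eq_self, List.nil_append]
  rcases hf : (PySem.List.pyRange 0 ((myString.toList.length : Int) - (pat.toList.length : Int) + 1) 1).find?
      (fun i => matchAt myString.toList pat.toList i) with _ | ⟨i⟩
  · have hnone : ¬ ∃ i ∈ PySem.List.pyRange 0 ((myString.toList.length : Int) - (pat.toList.length : Int) + 1) 1,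
        matchAt myString.toList pat.toList i = true := by
      rintro ⟨i, hi, hm⟩
      exact absurd hm (by simpa using List.find?_eq_none.mp hf i hi)
    rw [if_neg (by
      intro hin
      exact hnone ((find_iff_isIn myString.toList pat.toList).mpr hin))]
  · have hsome := List.find?_some hf
    have hmem := List.mem_of_find?_eq_some hf
    rw [if_pos ((find_iff_isIn myString.toList pat.toList).mp ⟨i, hmem, hsome⟩)]
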